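-- pv_equiv track=rewrite | github.com/JoeyChuang1/Debiased-W2V-Model | code.py | skipgram_preprocessing
-- ===== SOURCE A (Python) =====
-- def build_current_surrounding_pairs(indices: "list[int]", window_size: int = 2):
--     array_len = len(indices)
--     surroundings = []
--     currents = []
--     for i in range(window_size, array_len - window_size):
--         currents.append(indices[i])
--         surround = []
--         for j in range(0 - window_size, 0 + window_size + 1):
--             if (j == 0):
--                 continue
--             surround.append(indices[i + j])
--         surroundings.append(surround)
--     return surroundings, currents
--
-- def expand_surrounding_words(ix_surroundings: "list[list[int]]", ix_current: "list[int]"):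
--     # TODO: your work here
--     surr = []
--     curr = []
--     for i in range(len(ix_surroundings)):
--         for j in range(len(ix_surroundings[i])):
--             surr.append(ix_surroundings[i][j])
--             curr.append(ix_current[i])
--     return surr, curr
--
-- def skipgram_preprocessing(indices_list: "list[list[int]]", window_size: int = 2):
--     source = []
--     target = []
--     for ind_list in indices_list:
--         surrounding, current = build_current_surrounding_pairs(ind_list, window_size=window_size)
--         surr, curr = expand_surrounding_words(surrounding, current)
--         source += surr
--         target += curr
--     return source, target
-- ===== SOURCE B (Python) =====
-- def skipgram_preprocessing(indices_list: "list[list[int]]", window_size: int = 2):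
--     # Single fused pass: no intermediate surroundings/currents structures.
--     source = []
--     target = []
--     for ind_list in indices_list:
--         n = len(ind_list)
--         for i in range(window_size, n - window_size):
--             for j in range(-window_size, window_size + 1):
--                 if j != 0:
--                     source.append(ind_list[i + j])
--                     target.append(ind_list[i])
--     return source, target
-- ===== Notes on version B (the rewrite author's own statement) =====
-- stated objective: simpler
-- what changed: Replaced A's two-stage decomposition (build per-center surroundings lists, then expand them with a second indexed double loop) by one self-contained fused triple loop that appends each (context, center) pair directly, with no helper functions and no intermediate nested list.
import Mathlib
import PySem

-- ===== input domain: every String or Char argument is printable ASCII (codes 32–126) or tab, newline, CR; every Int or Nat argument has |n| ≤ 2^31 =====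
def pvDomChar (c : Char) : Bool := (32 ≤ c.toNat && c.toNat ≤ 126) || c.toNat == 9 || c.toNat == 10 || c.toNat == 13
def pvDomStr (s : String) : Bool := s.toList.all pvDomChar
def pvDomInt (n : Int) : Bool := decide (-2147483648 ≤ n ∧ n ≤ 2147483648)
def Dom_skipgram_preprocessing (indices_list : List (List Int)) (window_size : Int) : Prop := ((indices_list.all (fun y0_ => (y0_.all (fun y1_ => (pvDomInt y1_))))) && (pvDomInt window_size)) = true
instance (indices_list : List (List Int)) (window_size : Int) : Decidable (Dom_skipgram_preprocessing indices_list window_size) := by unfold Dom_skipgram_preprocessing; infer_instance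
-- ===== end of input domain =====

-- B replaces A's build-surroundings-then-expand two-stage decomposition by one fused
-- triple loop appending (context, center) pairs directly (objective: simpler).

-- ===== PORT A =====
-- build_current_surrounding_pairs: transliteration (pyGetD realises indices[i]; out-of-range
-- indexing, which raises in Python, is excluded by Pre_ below)
def pvBuild (indices : List Int) (window_size : Int) : List (List Int) × List Int :=
  let array_len : Int := (indices.length : Int)
  (PySem.List.pyRange window_size (array_len - window_size) 1).foldl
    (fun st i =>
      let currents := st.2 ++ [PySem.List.pyGetD indices i 0]
      let surround := (PySem.List.pyRange (0 - window_size) (0 + window_size + 1) 1).foldl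
        (fun s j => if j == 0 then s else s ++ [PySem.List.pyGetD indices (i + j) 0]) []
      (st.1 ++ [surround], currents))
    ([], [])

-- expand_surrounding_words: transliteration
def pvExpand (ix_surroundings : List (List Int)) (ix_current : List Int) : List Int × List Int :=
  (PySem.List.pyRange 0 ((ix_surroundings.length : Int)) 1).foldl
    (fun st i =>
      let row := PySem.List.pyGetD ix_surroundings i []
      (PySem.List.pyRange 0 ((row.length : Int)) 1).foldl
        (fun st2 j => (st2.1 ++ [PySem.List.pyGetD row j 0], st2.2 ++ [PySem.List.pyGetD ix_current i 0])) st)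
    ([], [])

def skipgram_preprocessing (indices_list : List (List Int)) (window_size : Int) : List Int × List Int :=
  indices_list.foldl
    (fun st ind_list =>
      let bc := pvBuild ind_list window_size
      let sc := pvExpand bc.1 bc.2
      (st.1 ++ sc.1, st.2 ++ sc.2))
    ([], [])

-- ===== PORT B =====
def skipgram_preprocessing_alt (indices_list : List (List Int)) (window_size : Int) : List Int × List Int :=
  indices_list.foldl
    (fun st ind_list =>
      (PySem.List.pyRange window_size ((ind_list.length : Int) - window_size) 1).foldl
        (fun st1 i =>
          (PySem.List.pyRange (-window_size) (window_size + 1) 1).foldl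
            (fun st2 j =>
              if j != 0 then
                (st2.1 ++ [PySem.List.pyGetD ind_list (i + j) 0],
                 st2.2 ++ [PySem.List.pyGetD ind_list i 0])
              else st2)
            st1)
        st)
    ([], [])

-- ===== PRECONDITION & SPEC =====
-- A raises IndexError whenever window_size < 0 and indices_list is nonempty (its center
-- range then overruns every inner list); those inputs are excluded here.
def Pre_skipgram_preprocessing (indices_list : List (List Int)) (window_size : Int) : Prop :=
  0 ≤ window_size ∨ indices_list = []
instance (indices_list : List (List Int)) (window_size : Int) : Decidable (Pre_skipgram_preprocessing indices_list window_size) := by unfold Pre_skipgram_preprocessing; infer_instance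

def pvWitness_skipgram_preprocessing : List (List Int) × Int := ([[1, 2, 3, 4, 5], [6, 7, 8]], 1)

def Spec_skipgram_preprocessing (indices_list : List (List Int)) (window_size : Int) (out : List Int × List Int) : Prop := out = skipgram_preprocessing_alt indices_list window_size
instance (indices_list : List (List Int)) (window_size : Int) (out : List Int × List Int) : Decidable (Spec_skipgram_preprocessing indices_list window_size out) := by unfold Spec_skipgram_preprocessing; infer_instance

-- ===== CLAIM (what is proved, stated in full; the proofs are below) =====
def Claim_equal_skipgram_preprocessing : Prop := ∀ (indices_list : List (List Int)) (window_size : Int), Dom_skipgram_preprocessing indices_list window_size → Pre_skipgram_preprocessing indices_list window_size → Spec_skipgram_preprocessing indices_list window_size (skipgram_preprocessing indices_list window_size)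


-- ===== LEMMAS AND PROOFS =====

-- fold appending one element to each component of a pair state
theorem pv_foldl_pair_snoc {α β γ : Type} (L : List α) (f : α → β) (g : α → γ)
    (s : List β × List γ) :
    L.foldl (fun st x => (st.1 ++ [f x], st.2 ++ [g x])) s = (s.1 ++ L.map f, s.2 ++ L.map g) := by
  induction L generalizing s with
  | nil => simp
  | cons a t ih => simp [ih]

-- fold appending a list to each component of a pair state
theorem pv_foldl_pair_append {α β γ : Type} (L : List α) (F : α → List β) (G : α → List γ)
    (s : List β × List γ) :
    L.foldl (fun st x => (st.1 ++ F x, st.2 ++ G x)) s = (s.1 ++ L.flatMap F, s.2 ++ L.flatMap G) := by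
  induction L generalizing s with
  | nil => simp
  | cons a t ih => simp [ih]

-- B's guarded pair-appending inner loop
theorem pv_foldl_pair_if_snoc (L : List Int) (f g : Int → Int) (s : List Int × List Int) :
    L.foldl (fun st j => if j != 0 then (st.1 ++ [f j], st.2 ++ [g j]) else st) s
      = (s.1 ++ (L.filter (fun j => j != 0)).map f, s.2 ++ (L.filter (fun j => j != 0)).map g) := by
  induction L generalizing s with
  | nil => simp
  | cons a t ih =>
    rw [List.foldl_cons]
    by_cases h : a = 0
    · rw [if_neg (by simp [h]), ih]
      simp [h]
    · rw [if_pos (by simp [h]), ih]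
      simp [h]

-- A's guarded single-list inner loop ('continue' on j == 0)
theorem pv_foldl_if_skip_snoc (L : List Int) (f : Int → Int) (acc : List Int) :
    L.foldl (fun s j => if j == 0 then s else s ++ [f j]) acc
      = acc ++ (L.filter (fun j => j != 0)).map f := by
  induction L generalizing acc with
  | nil => simp
  | cons a t ih =>
    rw [List.foldl_cons]
    by_cases h : a = 0
    · rw [if_pos (by simp [h]), ih]
      simp [h]
    · rw [if_neg (by simp [h]), ih]
      simp [h]

theorem pv_getD_append_left (xs : List Int) (y i : Int) (h0 : 0 ≤ i)
    (h1 : i < (xs.length : Int)) :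
    PySem.List.pyGetD (xs ++ [y]) i 0 = PySem.List.pyGetD xs i 0 := by
  rw [PySem.List.pyGetD_eq_getElem _ _ h0 (by simp; omega),
      PySem.List.pyGetD_eq_getElem _ _ h0 h1]
  rw [List.getElem_append_left (by omega)]

theorem pv_getD_append_left' {α : Type} [Inhabited α] (xs : List α) (y : α) (d : α) (i : Int)
    (h0 : 0 ≤ i) (h1 : i < (xs.length : Int)) :
    PySem.List.pyGetD (xs ++ [y]) i d = PySem.List.pyGetD xs i d := by
  rw [PySem.List.pyGetD_eq_getElem _ _ h0 (by simp; omega),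
      PySem.List.pyGetD_eq_getElem _ _ h0 h1]
  rw [List.getElem_append_left (by omega)]

theorem pv_getD_append_length {α : Type} (xs : List α) (y : α) (d : α) :
    PySem.List.pyGetD (xs ++ [y]) (xs.length : Int) d = y := by
  rw [PySem.List.pyGetD_eq_getElem _ _ (by positivity) (by simp)]
  simp

-- characterisation of pvExpand on index-aligned map-shaped inputs
theorem pv_expand_map (R : List Int) (F : Int → List Int) (G : Int → Int) :
    pvExpand (R.map F) (R.map G)
      = (R.flatMap F, R.flatMap (fun i => List.replicate (F i).length (G i))) := by
  unfold pvExpand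
  induction R using List.reverseRecOn with
  | nil => simp [PySem.List.pyRange_one_eq_nil]
  | append_singleton R a ih =>
    have hlen : (((R ++ [a]).map F).length : Int) = ((R.map F).length : Int) + 1 := by simp
    rw [hlen, PySem.List.pyRange_one_succ_right (by positivity), List.foldl_append]
    have hcongr :
        (PySem.List.pyRange 0 ((R.map F).length : Int) 1).foldl
          (fun st i =>
            let row := PySem.List.pyGetD ((R ++ [a]).map F) i []
            (PySem.List.pyRange 0 ((row.length : Int)) 1).foldl
              (fun st2 j => (st2.1 ++ [PySem.List.pyGetD row j 0],
                             st2.2 ++ [PySem.List.pyGetD ((R ++ [a]).map G) i 0])) st)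
          (([], []) : List Int × List Int)
        = (PySem.List.pyRange 0 ((R.map F).length : Int) 1).foldl
          (fun st i =>
            let row := PySem.List.pyGetD (R.map F) i []
            (PySem.List.pyRange 0 ((row.length : Int)) 1).foldl
              (fun st2 j => (st2.1 ++ [PySem.List.pyGetD row j 0],
                             st2.2 ++ [PySem.List.pyGetD (R.map G) i 0])) st)
          (([], []) : List Int × List Int) := by
      apply PySem.List.foldl_congr_mem
      intro acc x hx
      rw [PySem.List.mem_pyRange_one] at hx
      simp only [List.map_append, List.map_cons, List.map_nil]
      rw [pv_getD_append_left' (R.map F) (F a) [] x hx.1 (by simpa using hx.2)]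
      rw [pv_getD_append_left (R.map G) (G a) x hx.1 (by simpa using hx.2)]
    rw [hcongr, ih]
    -- last iteration: index (R.map F).length picks out (F a, G a)
    simp only [List.foldl_cons, List.foldl_nil, List.map_append, List.map_cons, List.map_nil]
    rw [pv_getD_append_length (R.map F) (F a) []]
    have : ((R.map F).length : Int) = ((R.map G).length : Int) := by simp
    rw [this, pv_getD_append_length (R.map G) (G a) 0]
    rw [pv_foldl_pair_snoc]
    rw [PySem.List.map_pyGetD_pyRange_zero']
    have hconst : (PySem.List.pyRange 0 ((F a).length : Int) 1).map (fun _ => G a)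
        = List.replicate (F a).length (G a) := by
      rw [List.map_const']
      simp [PySem.List.length_pyRange_one]
    rw [hconst]
    simp

-- per ind_list, A's two-stage step equals B's fused step
theorem pv_step_eq (l : List Int) (w : Int) (s : List Int × List Int) :
    (let bc := pvBuild l w
     let sc := pvExpand bc.1 bc.2
     (s.1 ++ sc.1, s.2 ++ sc.2))
      = (PySem.List.pyRange w ((l.length : Int) - w) 1).foldl
          (fun st1 i =>
            (PySem.List.pyRange (-w) (w + 1) 1).foldl
              (fun st2 j =>
                if j != 0 then
                  (st2.1 ++ [PySem.List.pyGetD l (i + j) 0],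
                   st2.2 ++ [PySem.List.pyGetD l i 0])
                else st2)
              st1)
          s := by
  have hbuild : pvBuild l w
      = ((PySem.List.pyRange w ((l.length : Int) - w) 1).map
           (fun i => ((PySem.List.pyRange (0 - w) (0 + w + 1) 1).filter (fun j => j != 0)).map
             (fun j => PySem.List.pyGetD l (i + j) 0)),
         (PySem.List.pyRange w ((l.length : Int) - w) 1).map
           (fun i => PySem.List.pyGetD l i 0)) := by
    unfold pvBuild
    simp only [pv_foldl_if_skip_snoc, List.nil_append]
    rw [pv_foldl_pair_snoc]
    simp
  have hB : (PySem.List.pyRange w ((l.length : Int) - w) 1).foldl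
          (fun st1 i =>
            (PySem.List.pyRange (-w) (w + 1) 1).foldl
              (fun st2 j =>
                if j != 0 then
                  (st2.1 ++ [PySem.List.pyGetD l (i + j) 0],
                   st2.2 ++ [PySem.List.pyGetD l i 0])
                else st2)
              st1)
          s
      = (s.1 ++ (PySem.List.pyRange w ((l.length : Int) - w) 1).flatMap
            (fun i => ((PySem.List.pyRange (-w) (w + 1) 1).filter (fun j => j != 0)).map
              (fun j => PySem.List.pyGetD l (i + j) 0)),
         s.2 ++ (PySem.List.pyRange w ((l.length : Int) - w) 1).flatMap
            (fun i => ((PySem.List.pyRange (-w) (w + 1) 1).filter (fun j => j != 0)).map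
              (fun _ => PySem.List.pyGetD l i 0))) := by
    simp only [pv_foldl_pair_if_snoc]
    rw [pv_foldl_pair_append]
  rw [hB]
  simp only [hbuild]
  rw [pv_expand_map]
  have hrange : PySem.List.pyRange (0 - w) (0 + w + 1) 1 = PySem.List.pyRange (-w) (w + 1) 1 := by
    norm_num
  simp only [hrange]
  refine Prod.ext rfl ?_
  simp only
  congr 1
  apply List.flatMap_congr  -- pointwise equality of the target component
  intro i _
  rw [List.length_map, ← List.map_const']

-- ===== VERDICT (by name: the statement is the Claim_ definition above) =====
theorem pv_main (L : List (List Int)) (w : Int) :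
    skipgram_preprocessing L w = skipgram_preprocessing_alt L w := by
  unfold skipgram_preprocessing skipgram_preprocessing_alt
  induction L using List.reverseRecOn with
  | nil => rfl
  | append_singleton L l ih =>
    rw [List.foldl_append, List.foldl_append, ih]
    simp only [List.foldl_cons, List.foldl_nil]
    exact pv_step_eq l w _

theorem skipgram_preprocessing_spec : Claim_equal_skipgram_preprocessing := by
  intro indices_list window_size _ _
  exact pv_main indices_list window_size
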